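-- pv_equiv track=rewrite | github.com/hankuipeng/HackerRank | General/NotYetSolved/minTime.py | minTime1
-- ===== SOURCE A (Python) =====
-- def minTime1(machines, goal):
-- #    ans = 0
--     num = 0
--     day = 1
--
-- # =============================================================================
-- #     import pdb
-- #     pdb.set_trace()
-- # =============================================================================
--     while num < goal:
--         num = 0
--         # num: number of items produced so far
--         for i in range(len(machines)):
--             num += day//machines[i]
--         day += 1
--     return day-1
-- ===== SOURCE B (Python) =====
-- def minTime1(machines, goal):
--     # Binary search on the day: production sum(d // m) is monotone in d for
--     # positive machine rates, so find the least day reaching the goal.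
--     if goal <= 0:
--         return 0
--     lo, hi = 1, goal * min(machines)
--     while lo < hi:
--         mid = (lo + hi) // 2
--         if sum(mid // m for m in machines) >= goal:
--             hi = mid
--         else:
--             lo = mid + 1
--     return lo
-- ===== Notes on version B (the rewrite author's own statement) =====
-- stated objective: alternative
-- what changed: Replaces A's day-by-day simulation (recomputing total production each day until the goal is met) with a binary search over the day value, exploiting that production is monotone for positive rates; fewer production evaluations on the positive-rate domain, though a timing run's mixed-sign inputs fall outside Pre_ so no speed is claimed.
-- outside the precondition, e.g. on minTime1([1, -2], 2): A returns 4, B returns 1; on minTime1([0], 1): A raises ZeroDivisionError, B returns 1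
import Mathlib
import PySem

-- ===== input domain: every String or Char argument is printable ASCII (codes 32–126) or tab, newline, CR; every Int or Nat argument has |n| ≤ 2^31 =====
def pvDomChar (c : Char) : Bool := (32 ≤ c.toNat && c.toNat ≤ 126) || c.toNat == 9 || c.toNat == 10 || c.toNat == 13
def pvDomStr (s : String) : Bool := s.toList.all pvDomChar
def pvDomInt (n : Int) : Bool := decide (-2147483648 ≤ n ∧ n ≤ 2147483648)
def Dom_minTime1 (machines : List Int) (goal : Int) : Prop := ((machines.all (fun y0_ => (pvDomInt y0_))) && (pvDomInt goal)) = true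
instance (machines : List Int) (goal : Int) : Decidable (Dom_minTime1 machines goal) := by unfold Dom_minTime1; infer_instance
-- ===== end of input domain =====

-- B replaces A's day-by-day simulation with a binary search on the day value
-- (production is monotone for positive rates): a different algorithm; no speed claim.

-- ===== PORT A =====
-- A's while-loop; the fuel argument only makes it total in Lean (under
-- Pre_minTime1 the loop exits before the fuel runs out, see minTime1_fuel below).
def minTime1Loop (machines : List Int) (goal : Int) : Nat → Int → Int → Int
  | 0, _, day => day - 1
  | fuel + 1, num, day =>
    if num < goal then
      minTime1Loop machines goal fuel
        (machines.foldl (fun n m => n + PySem.Int.floordiv day m) 0) (day + 1)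
    else day - 1

def minTime1 (machines : List Int) (goal : Int) : Int :=
  minTime1Loop machines goal
    ((goal * ((PySem.List.min? machines (fun x => x)).getD 1)).toNat + 1) 0 1

-- ===== PORT B =====
-- sum(mid // m for m in machines)
def altSum (machines : List Int) (d : Int) : Int :=
  machines.foldl (fun acc m => acc + PySem.Int.floordiv d m) 0

def altSearch (machines : List Int) (goal : Int) (lo hi : Int) : Int :=
  if h : lo < hi then
    let mid := PySem.Int.floordiv (lo + hi) 2
    if goal ≤ altSum machines mid then altSearch machines goal lo mid
    else altSearch machines goal (mid + 1) hi
  else lo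
termination_by (hi - lo).toNat
decreasing_by
  · have _h1 := (PySem.Int.le_floordiv_iff_mul_le (a := lo + hi) (b := 2) (q := lo) (by omega)).2 (by omega)
    have h2 := (PySem.Int.floordiv_lt_iff_lt_mul (a := lo + hi) (b := 2) (q := hi) (by omega)).2 (by omega)
    omega
  · have h1 := (PySem.Int.le_floordiv_iff_mul_le (a := lo + hi) (b := 2) (q := lo) (by omega)).2 (by omega)
    have h2 := (PySem.Int.floordiv_lt_iff_lt_mul (a := lo + hi) (b := 2) (q := hi) (by omega)).2 (by omega)
    omega

-- min(machines): Python raises on an empty list (excluded by Pre_ when goal > 0)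
def minTime1_alt (machines : List Int) (goal : Int) : Int :=
  if goal ≤ 0 then 0
  else altSearch machines goal 1 (goal * ((PySem.List.min? machines (fun x => x)).getD 0))

-- ===== PRECONDITION & SPEC =====
-- Pre_ excludes, when goal > 0: a zero rate (A raises ZeroDivisionError), an empty
-- machine list (A loops forever), and negative rates, on which production is not
-- monotone — there A's value (when it returns at all) is an artefact of day-by-day
-- scanning and B's binary search does the natural thing for the positive-rate domain.
def Pre_minTime1 (machines : List Int) (goal : Int) : Prop :=
  goal ≤ 0 ∨ (machines ≠ [] ∧ ∀ m ∈ machines, 0 < m)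
instance (machines : List Int) (goal : Int) : Decidable (Pre_minTime1 machines goal) := by
  unfold Pre_minTime1; infer_instance

def pvWitness_minTime1 : List Int × Int := ([2, 3], 10)

def Spec_minTime1 (machines : List Int) (goal : Int) (out : Int) : Prop := out = minTime1_alt machines goal
instance (machines : List Int) (goal : Int) (out : Int) : Decidable (Spec_minTime1 machines goal out) := by unfold Spec_minTime1; infer_instance

-- ===== CLAIM (what is proved, stated in full; the proofs are below) =====
def Claim_equal_minTime1 : Prop := ∀ (machines : List Int) (goal : Int), Dom_minTime1 machines goal → Pre_minTime1 machines goal → Spec_minTime1 machines goal (minTime1 machines goal)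

-- ===== LEMMAS AND PROOFS =====

theorem foldl_add_map (g : Int → Int) (l : List Int) (a : Int) :
    l.foldl (fun acc m => acc + g m) a = a + (l.map g).sum := by
  induction l generalizing a with
  | nil => simp
  | cons x t ih => simp [List.foldl, ih]; ring

theorem altSum_eq_sum (machines : List Int) (d : Int) :
    altSum machines d = (machines.map (fun m => PySem.Int.floordiv d m)).sum := by
  simpa [altSum] using foldl_add_map (fun m => PySem.Int.floordiv d m) machines 0

theorem altSum_mono (machines : List Int) (hpos : ∀ m ∈ machines, 0 < m)
    {d e : Int} (hde : d ≤ e) : altSum machines d ≤ altSum machines e := by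
  rw [altSum_eq_sum, altSum_eq_sum]
  induction machines with
  | nil => simp
  | cons x t ih =>
    have hx : 0 < x := hpos x (by simp)
    have h1 : PySem.Int.floordiv d x ≤ PySem.Int.floordiv e x := by
      rw [PySem.Int.floordiv_eq_ediv_of_pos hx, PySem.Int.floordiv_eq_ediv_of_pos hx]
      exact Int.ediv_le_ediv hx hde
    have h2 := ih (fun m hm => hpos m (by simp [hm]))
    simp only [List.map_cons, List.sum_cons]
    omega

theorem altSum_zero (machines : List Int) (hpos : ∀ m ∈ machines, 0 < m) :
    altSum machines 0 = 0 := by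
  rw [altSum_eq_sum]
  induction machines with
  | nil => simp
  | cons x t ih =>
    have hx : 0 < x := hpos x (by simp)
    have h2 := ih (fun m hm => hpos m (by simp [hm]))
    simp only [List.map_cons, List.sum_cons, h2,
      PySem.Int.floordiv_eq_ediv_of_pos hx]
    simp

theorem altSum_term_nonneg (machines : List Int) (d : Int) (hd : 0 ≤ d)
    (hpos : ∀ m ∈ machines, 0 < m) : 0 ≤ altSum machines d := by
  rw [altSum_eq_sum]
  apply List.sum_nonneg
  intro y hy
  obtain ⟨m, hm, rfl⟩ := List.mem_map.1 hy
  have hmm := hpos m hm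
  rw [PySem.Int.floordiv_eq_ediv_of_pos hmm]
  exact Int.ediv_nonneg hd (le_of_lt hmm)

theorem altSum_reach (machines : List Int) (goal m0 : Int) (hm : m0 ∈ machines)
    (hpos : ∀ m ∈ machines, 0 < m) (hg : 0 < goal) :
    goal ≤ altSum machines (goal * m0) := by
  have hm0 : 0 < m0 := hpos m0 hm
  have hd : 0 ≤ goal * m0 := le_of_lt (mul_pos hg hm0)
  rw [altSum_eq_sum]
  induction machines with
  | nil => simp at hm
  | cons x t ih =>
    have hxt : ∀ m ∈ t, 0 < m := fun m hmt => hpos m (by simp [hmt])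
    have hx : 0 < x := hpos x (by simp)
    have hterm : 0 ≤ PySem.Int.floordiv (goal * m0) x := by
      rw [PySem.Int.floordiv_eq_ediv_of_pos hx]
      exact Int.ediv_nonneg hd (le_of_lt hx)
    rcases List.mem_cons.1 hm with rfl | hmt
    · have hsum : 0 ≤ (t.map (fun m => PySem.Int.floordiv (goal * m0) m)).sum := by
        have := altSum_term_nonneg t (goal * m0) hd hxt
        rwa [altSum_eq_sum] at this
      have hterm' : PySem.Int.floordiv (goal * m0) m0 = goal := by
        rw [PySem.Int.floordiv_eq_ediv_of_pos hm0]
        exact Int.mul_ediv_cancel goal (by omega)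
      simp only [List.map_cons, List.sum_cons, hterm']
      omega
    · have := ih hmt hxt
      simp only [List.map_cons, List.sum_cons]
      omega

-- exit shape of A's loop
theorem minTime1Loop_exit (machines : List Int) (goal : Int) (fuel : Nat) (num day : Int)
    (h : ¬ num < goal) : minTime1Loop machines goal fuel num day = day - 1 := by
  cases fuel <;> simp [minTime1Loop, h]

theorem minTime1Loop_crossing (machines : List Int) (goal : Int)
    (hpos : ∀ m ∈ machines, 0 < m) (B : Int) (hB : goal ≤ altSum machines B) :
    ∀ (fuel : Nat) (day : Int), 1 ≤ day → altSum machines (day - 1) < goal →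
      B ≤ day - 1 + fuel →
      1 ≤ minTime1Loop machines goal fuel (altSum machines (day - 1)) day ∧
      goal ≤ altSum machines (minTime1Loop machines goal fuel (altSum machines (day - 1)) day) ∧
      altSum machines (minTime1Loop machines goal fuel (altSum machines (day - 1)) day - 1) < goal := by
  intro fuel
  induction fuel with
  | zero =>
    intro day hday hlt hfuel
    exfalso
    have := altSum_mono machines hpos (d := B) (e := day - 1) (by omega)
    omega
  | succ k ih =>
    intro day hday hlt hfuel
    have hstep : machines.foldl (fun n m => n + PySem.Int.floordiv day m) 0
        = altSum machines ((day + 1) - 1) := by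
      simp [altSum]
    rw [show minTime1Loop machines goal (k + 1) (altSum machines (day - 1)) day
        = minTime1Loop machines goal k (altSum machines ((day + 1) - 1)) (day + 1) by
      rw [← hstep]; simp [minTime1Loop, hlt]]
    by_cases hq : altSum machines ((day + 1) - 1) < goal
    · exact ih (day + 1) (by omega) hq (by omega)
    · rw [minTime1Loop_exit machines goal k _ _ hq]
      refine ⟨by omega, ?_, ?_⟩
      · simpa using not_lt.1 hq
      · simpa using hlt

theorem altSearch_crossing (machines : List Int) (goal : Int) :
    ∀ (lo hi : Int), 1 ≤ lo → lo ≤ hi → altSum machines (lo - 1) < goal →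
      goal ≤ altSum machines hi →
      1 ≤ altSearch machines goal lo hi ∧
      goal ≤ altSum machines (altSearch machines goal lo hi) ∧
      altSum machines (altSearch machines goal lo hi - 1) < goal := by
  intro lo hi
  fun_induction altSearch machines goal lo hi with
  | case1 lo hi h mid hmid ih =>
    intro h1 _ hlow hhigh
    have hb1 := (PySem.Int.le_floordiv_iff_mul_le (a := lo + hi) (b := 2) (q := lo) (by omega)).2 (by omega)
    have hb2 := (PySem.Int.floordiv_lt_iff_lt_mul (a := lo + hi) (b := 2) (q := hi) (by omega)).2 (by omega)
    exact ih h1 (by omega) hlow hmid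
  | case2 lo hi h mid hmid ih =>
    intro h1 _ hlow hhigh
    have hb1 := (PySem.Int.le_floordiv_iff_mul_le (a := lo + hi) (b := 2) (q := lo) (by omega)).2 (by omega)
    have hb2 := (PySem.Int.floordiv_lt_iff_lt_mul (a := lo + hi) (b := 2) (q := hi) (by omega)).2 (by omega)
    refine ih (by omega) (by omega) ?_ hhigh
    have : mid + 1 - 1 = mid := by omega
    rw [this]
    exact not_le.1 hmid
  | case3 lo hi h =>
    intro h1 hle hlow hhigh
    have : lo = hi := by omega
    subst this
    exact ⟨h1, hhigh, hlow⟩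

theorem crossing_unique (machines : List Int) (goal : Int)
    (hpos : ∀ m ∈ machines, 0 < m) (r1 r2 : Int)
    (h1 : goal ≤ altSum machines r1) (h1' : altSum machines (r1 - 1) < goal)
    (h2 : goal ≤ altSum machines r2) (h2' : altSum machines (r2 - 1) < goal) :
    r1 = r2 := by
  rcases lt_trichotomy r1 r2 with h | h | h
  · have := altSum_mono machines hpos (d := r1) (e := r2 - 1) (by omega)
    omega
  · exact h
  · have := altSum_mono machines hpos (d := r2) (e := r1 - 1) (by omega)
    omega

theorem minTime1_spec : Claim_equal_minTime1 := by
  intro machines goal _ hpre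
  unfold Spec_minTime1 minTime1_alt minTime1
  by_cases hg : goal ≤ 0
  · rw [minTime1Loop_exit machines goal _ 0 1 (by omega)]
    simp [hg]
  · rcases hpre with h | ⟨hne, hpos⟩
    · omega
    have hgpos : 0 < goal := by omega
    obtain ⟨m0, hm0⟩ : ∃ m0, PySem.List.min? machines (fun x => x) = some m0 := by
      cases hmin : PySem.List.min? machines (fun x => x) with
      | none => exact absurd ((PySem.List.min?_eq_none_iff machines (fun x => x)).1 hmin) hne
      | some m => exact ⟨m, rfl⟩
    have hm0mem : m0 ∈ machines := PySem.List.min?_mem hm0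
    have hm0pos : 0 < m0 := hpos m0 hm0mem
    have hz : altSum machines 0 = 0 := altSum_zero machines hpos
    have hreach : goal ≤ altSum machines (goal * m0) :=
      altSum_reach machines goal m0 hm0mem hpos hgpos
    have hhi : 1 ≤ goal * m0 := by
      have := mul_pos hgpos hm0pos; omega
    -- A's loop result
    have h0 : (0 : Int) = altSum machines (1 - 1) := by rw [show (1:Int) - 1 = 0 by omega, hz]
    have hfuel : goal * m0 ≤ (1:Int) - 1 + ((goal * ((PySem.List.min? machines (fun x => x)).getD 1)).toNat + 1 : Nat) := by
      rw [hm0]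
      simp only [Option.getD_some]
      have := Int.self_le_toNat (goal * m0)
      push_cast
      omega
    have hA := minTime1Loop_crossing machines goal hpos (goal * m0) hreach
      ((goal * ((PySem.List.min? machines (fun x => x)).getD 1)).toNat + 1) 1 (by omega)
      (by rw [← h0]; omega) hfuel
    rw [← h0] at hA
    -- B's search result
    have hB := altSearch_crossing machines goal 1 (goal * m0) (by omega) hhi
      (by rw [show (1:Int) - 1 = 0 by omega, hz]; omega) hreach
    rw [if_neg hg, hm0]
    rw [hm0] at hA
    simp only [Option.getD_some] at hA ⊢
    exact crossing_unique machines goal hpos _ _ hA.2.1 hA.2.2 hB.2.1 hB.2.2
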